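-- pv_equiv track=rewrite | github.com/dstackai/dstack | cli/dstack/core/repo/local.py | rstrip
-- ===== SOURCE A (Python) =====
-- def rstrip(value: str) -> str:
--     end = len(value) - 1
--     while end >= 0:
--         if not value[end].isspace():
--             break
--         if end > 0 and value[end - 1] == "\\":
--             break  # escaped space
--         end -= 1
--     else:
--         return ""
--     return value[: end + 1]
-- ===== SOURCE B (Python) =====
-- def rstrip(value: str) -> str:
--     keep = 0
--     prev = ""
--     for i, c in enumerate(value):
--         if not c.isspace() or prev == "\\":
--             keep = i + 1
--         prev = c
--     return value[:keep]
-- ===== Notes on version B (the rewrite author's own statement) =====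
-- stated objective: alternative
-- what changed: Replaces A's backward while-loop index scan (walking end from len-1 down with an early break and a while-else) by a single forward left-to-right pass that tracks the last position that must be kept (a non-whitespace char, or a whitespace char preceded by a backslash) and slices once at the end.
import Mathlib
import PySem

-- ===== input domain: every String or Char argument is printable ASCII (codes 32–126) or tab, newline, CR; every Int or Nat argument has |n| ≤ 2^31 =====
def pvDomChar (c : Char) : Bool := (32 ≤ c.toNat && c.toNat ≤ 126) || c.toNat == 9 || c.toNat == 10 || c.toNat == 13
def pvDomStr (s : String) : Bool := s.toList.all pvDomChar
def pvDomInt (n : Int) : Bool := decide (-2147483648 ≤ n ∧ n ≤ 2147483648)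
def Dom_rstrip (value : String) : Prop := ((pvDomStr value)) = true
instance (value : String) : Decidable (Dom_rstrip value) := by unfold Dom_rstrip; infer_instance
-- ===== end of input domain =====

-- B replaces A's backward index scan by a single forward left-to-right pass
-- (tracking the last position that must be kept); objective: alternative, not faster.

-- ===== PORT A =====
-- the while loop: `end` walks down; returns the final `end`, or -1 when the loop
-- runs off the left edge (Python's while-else).  `value[end]` / `value[end-1]` are
-- always in range here (0 ≤ e < len), so `(pyGet? …).getD ' '` is exact.
def rstripLoop (l : List Char) (e : Int) : Int :=
  if 0 ≤ e then
    if ¬ PySem.Chars.isspace ((PySem.List.pyGet? l e).getD ' ') then e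
    else if 0 < e ∧ (PySem.List.pyGet? l (e - 1)).getD ' ' = '\\' then e
    else rstripLoop l (e - 1)
  else -1
termination_by (e + 1).toNat
decreasing_by omega

def rstrip (value : String) : String :=
  let e := rstripLoop value.toList (PySem.Str.len value - 1)
  if e < 0 then ""  -- while-else branch: every character was stripped
  else PySem.Str.slice value none (some (e + 1))

-- ===== PORT B =====
-- one step of B's for-loop: state = (keep, prev), item = (i, c)
def rstripStep (st : Int × String) (ic : Int × Char) : Int × String :=
  ((if ¬ PySem.Chars.isspace ic.2 ∨ st.2 = "\\" then ic.1 + 1 else st.1), String.ofList [ic.2])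

def rstrip_alt (value : String) : String :=
  let st := (PySem.List.enumerate value.toList).foldl rstripStep (0, "")
  PySem.Str.slice value none (some st.1)

-- ===== PRECONDITION & SPEC =====
def Spec_rstrip (value : String) (out : String) : Prop := out = rstrip_alt value
instance (value : String) (out : String) : Decidable (Spec_rstrip value out) := by unfold Spec_rstrip; infer_instance

-- ===== CLAIM (what is proved, stated in full; the proofs are below) =====
def Claim_equal_rstrip : Prop := ∀ (value : String), Dom_rstrip value → Spec_rstrip value (rstrip value)

-- ===== LEMMAS AND PROOFS =====

-- index i of l must be kept: non-whitespace, or whitespace escaped by a backslash before it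
def goodB (l : List Char) (i : Nat) : Bool :=
  !PySem.Chars.isspace (l[i]?.getD ' ') || (decide (0 < i) && decide (l[i - 1]?.getD ' ' = '\\'))

-- largest index < n that must be kept, or -1
def lastGood (l : List Char) : Nat → Int
  | 0 => -1
  | n + 1 => if goodB l n then (n : Int) else lastGood l n

theorem lastGood_ge (l : List Char) (n : Nat) : -1 ≤ lastGood l n := by
  induction n with
  | zero => simp [lastGood]
  | succ n ih => simp only [lastGood]; split <;> omega

theorem loop_eq (l : List Char) (n : Nat) (hn : n ≤ l.length) :
    rstripLoop l ((n : Int) - 1) = lastGood l n := by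
  induction n with
  | zero => rw [rstripLoop]; simp [lastGood]
  | succ n ih =>
    have h1 : ((n + 1 : Nat) : Int) - 1 = (n : Int) := by push_cast; ring
    rw [h1, rstripLoop]
    have hget : (PySem.List.pyGet? l (n : Int)).getD ' ' = l[n]?.getD ' ' := by
      rw [PySem.List.pyGet?_natCast]
    have hget' : 0 < n → (PySem.List.pyGet? l ((n : Int) - 1)).getD ' ' = l[n - 1]?.getD ' ' := by
      intro hpos
      have he : ((n : Int) - 1) = ((n - 1 : Nat) : Int) := by omega
      rw [he, PySem.List.pyGet?_natCast]
    rw [if_pos (show (0:Int) ≤ (n:Int) by exact_mod_cast Nat.zero_le n), hget]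
    by_cases hsp : PySem.Chars.isspace (l[n]?.getD ' ')
    · rw [if_neg (by simp [hsp])]
      by_cases hpos : 0 < n
      · rw [hget' hpos]
        by_cases hesc : l[n - 1]?.getD ' ' = '\\'
        · rw [if_pos ⟨by exact_mod_cast hpos, hesc⟩]
          simp [lastGood, goodB, hsp, hpos, hesc]
        · rw [if_neg (fun h => hesc h.2)]
          rw [ih (by omega)]
          simp [lastGood, goodB, hsp, hesc]
      · have hn0 : n = 0 := by omega
        subst hn0
        rw [if_neg (by rintro ⟨h, _⟩; omega)]
        rw [ih (by omega)]
        simp [lastGood, goodB, hsp]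
    · rw [if_pos hsp]
      simp [lastGood, goodB, hsp]

-- lastGood only looks at the first n entries
theorem lastGood_append (l : List Char) (c : Char) (n : Nat) (hn : n ≤ l.length) :
    lastGood (l ++ [c]) n = lastGood l n := by
  induction n with
  | zero => rfl
  | succ n ih =>
    have hlt : n < l.length := by omega
    have hg : goodB (l ++ [c]) n = goodB l n := by
      unfold goodB
      rw [List.getElem?_append_left hlt]
      by_cases hpos : 0 < n
      · rw [List.getElem?_append_left (show n - 1 < l.length by omega)]
      · simp only [Nat.not_lt, Nat.le_zero] at hpos; simp [hpos]
    simp only [lastGood, hg, ih (by omega)]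

-- the last character of l as B's `prev` string
def prevStr (l : List Char) : String :=
  match l.getLast? with
  | none => ""
  | some c => String.ofList [c]

theorem prevStr_eq_backslash (l : List Char) :
    (prevStr l = "\\") ↔ (0 < l.length ∧ l[l.length - 1]?.getD ' ' = '\\') := by
  cases h : l.getLast? with
  | none =>
    rw [List.getLast?_eq_none_iff] at h
    subst h; simp [prevStr]
  | some c =>
    have hne : l ≠ [] := by intro h'; subst h'; simp at h
    have hlen : 0 < l.length := List.length_pos_iff.mpr hne
    have hc : l[l.length - 1]?.getD ' ' = c := by
      rw [List.getElem?_eq_getElem (by omega), Option.getD_some, ← List.getLast_eq_getElem hne]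
      exact Option.some_injective _ ((List.getLast?_eq_some_getLast hne).symm.trans h)
    simp only [prevStr, h, hlen, hc, true_and]
    constructor
    · intro he
      have h2 := congrArg String.toList he
      simp at h2
      exact h2
    · intro he
      subst he
      decide

theorem fold_eq (l : List Char) :
    (PySem.List.enumerate l).foldl rstripStep (0, "") =
      (lastGood l l.length + 1, prevStr l) := by
  induction l using List.reverseRecOn with
  | nil => rfl
  | append_singleton l c ih =>
    rw [PySem.List.enumerate_append, List.foldl_append, ih]
    simp only [PySem.List.enumerate_cons, PySem.List.enumerate_nil, List.foldl_cons, List.foldl_nil]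
    have hlen : (l ++ [c]).length = l.length + 1 := by simp
    simp only [rstripStep, zero_add]
    rw [Prod.mk.injEq]
    refine ⟨?_, ?_⟩
    · -- keep component
      have hprev := prevStr_eq_backslash l
      have hgood : goodB (l ++ [c]) l.length =
          (!PySem.Chars.isspace c || decide (prevStr l = "\\")) := by
        unfold goodB
        rw [List.getElem?_append_right (le_refl _)]
        simp only [Nat.sub_self, List.getElem?_cons_zero, Option.getD_some]
        by_cases hpos : 0 < l.length
        · rw [List.getElem?_append_left (show l.length - 1 < l.length by omega)]
          simp [hprev, hpos]
        · simp only [Nat.not_lt, Nat.le_zero] at hpos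
          simp [hprev, hpos]
      simp only [hlen, lastGood, hgood, lastGood_append l c l.length (le_refl _)]
      by_cases h1 : ¬ PySem.Chars.isspace c ∨ prevStr l = "\\"
      · rw [if_pos h1]
        have hb : (!PySem.Chars.isspace c || decide (prevStr l = "\\")) = true := by
          rcases h1 with h | h <;> simp [h]
        rw [hb, if_pos rfl]
      · rw [if_neg h1]
        push Not at h1
        have hb : (!PySem.Chars.isspace c || decide (prevStr l = "\\")) = false := by
          simp [h1.1, h1.2]
        rw [hb]
        simp
    · -- prev component
      simp [prevStr]

-- ===== VERDICT (by name: the statement is the Claim_ definition above) =====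
theorem rstrip_spec : Claim_equal_rstrip := by
  intro value _
  unfold Spec_rstrip rstrip rstrip_alt
  rw [fold_eq]
  simp only [PySem.Str.len_eq]
  rw [loop_eq value.toList value.toList.length (le_refl _)]
  set e := lastGood value.toList value.toList.length with he
  by_cases hneg : e < 0
  · have he1 : e = -1 := by have := lastGood_ge value.toList value.toList.length; omega
    rw [if_pos hneg, he1]
    have hz : PySem.Str.slice value none (some (-1 + 1)) = "" := by
      apply String.toList_eq_nil_iff.mp
      rw [PySem.Str.toList_slice]
      norm_num
      simp [PySem.List.slice]
    rw [hz]
  · rw [if_neg hneg]
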